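-- pv_equiv track=rewrite | github.com/arturave/ManufacturingSystem | archiv/test_customer_standalone.py | validate_regon
-- ===== SOURCE A (Python) =====
-- def validate_regon(regon: str) -> bool:
--     """Validate Polish REGON number"""
--     regon = regon.replace('-', '').replace(' ', '')
--     if not regon or len(regon) not in [9, 14]:
--         return False
--
--     try:
--         if len(regon) == 9:
--             weights = [8, 9, 2, 3, 4, 5, 6, 7]
--             check_sum = sum(int(regon[i]) * weights[i] for i in range(8))
--             return check_sum % 11 == int(regon[8])
--         else:  # 14 digits
--             weights = [2, 4, 8, 5, 0, 9, 7, 3, 6, 1, 2, 4, 8]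
--             check_sum = sum(int(regon[i]) * weights[i] for i in range(13))
--             return check_sum % 11 == int(regon[13])
--     except (ValueError, IndexError):
--         return False
-- ===== SOURCE B (Python) =====
-- _W9 = (8, 9, 2, 3, 4, 5, 6, 7)
-- _W14 = (2, 4, 8, 5, 0, 9, 7, 3, 6, 1, 2, 4, 8)
--
--
-- def _check(ds, ws, acc):
--     """Walk digits and weights together, keeping the checksum mod 11;
--     when the weights run out, ds[0] is the check digit."""
--     if not ds:
--         return False
--     d = ds[0]
--     if not ('0' <= d <= '9'):
--         return False
--     v = ord(d) - 48
--     if not ws: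
--         return acc == v
--     return _check(ds[1:], ws[1:], (acc + v * ws[0]) % 11)
--
--
-- def validate_regon(regon: str) -> bool:
--     """Validate Polish REGON number"""
--     regon = regon.replace('-', '').replace(' ', '')
--     if len(regon) == 9:
--         ws = _W9
--     elif len(regon) == 14:
--         ws = _W14
--     else:
--         return False
--     return _check(list(regon), list(ws), 0)
-- ===== Notes on version B (the rewrite author's own statement) =====
-- stated objective: alternative
-- what changed: Replaces A's two try/except-guarded indexed range-loops (full weighted sum, then one % 11 at the end) with a single recursive pass that consumes the digit list and weight list together, rejects a non-digit character the moment it is seen, keeps the accumulator reduced modulo 11 at every step, and compares the accumulator with the check digit when the weights are exhausted.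
import Mathlib
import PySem

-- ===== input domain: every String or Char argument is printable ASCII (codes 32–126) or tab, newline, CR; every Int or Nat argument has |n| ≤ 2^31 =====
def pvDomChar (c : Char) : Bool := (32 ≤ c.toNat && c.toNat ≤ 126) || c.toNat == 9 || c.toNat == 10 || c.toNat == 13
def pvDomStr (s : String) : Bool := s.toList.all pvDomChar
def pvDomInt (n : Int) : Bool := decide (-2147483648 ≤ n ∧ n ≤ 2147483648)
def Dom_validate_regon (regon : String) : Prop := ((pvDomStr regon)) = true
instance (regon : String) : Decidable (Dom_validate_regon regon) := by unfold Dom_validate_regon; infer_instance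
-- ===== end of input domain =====

-- B replaces A's two try/except-guarded indexed loops (full weighted sum, one final % 11) by a single
-- recursive pass over the digit and weight lists with a running mod-11 accumulator: objective 'alternative'.

-- ===== PORT A =====
-- sum(int(regon[i]) * weights[i] for i in range(n)); none = the ValueError/IndexError the try catches
def vrA_sum (cs : List Char) (ws : List Int) (n : Nat) : Option Int :=
  (PySem.List.pyRange 0 (n : Int) 1).foldl
    (fun acc i =>
      match acc with
      | none => none
      | some a =>
        match PySem.List.pyGet? cs i, PySem.List.pyGet? ws i with
        | some c, some w =>
          match PySem.Int.ofChars? [c] with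
          | some d => some (a + d * w)
          | none => none
        | _, _ => none)
    (some 0)

-- checksum % 11 == int(regon[k]); false also when the try body raised (none)
def vrA_finish (cs : List Char) (sum? : Option Int) (k : Int) : Bool :=
  match sum?, PySem.List.pyGet? cs k with
  | some s, some c =>
    match PySem.Int.ofChars? [c] with
    | some last => PySem.Int.mod s 11 == last
    | none => false
  | _, _ => false

def vrA_core (cs : List Char) : Bool :=
  if cs.length == 0 || (cs.length != 9 && cs.length != 14) then false
  else if cs.length == 9 then
    vrA_finish cs (vrA_sum cs [8, 9, 2, 3, 4, 5, 6, 7] 8) 8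
  else
    vrA_finish cs (vrA_sum cs [2, 4, 8, 5, 0, 9, 7, 3, 6, 1, 2, 4, 8] 13) 13

def validate_regon (regon : String) : Bool :=
  vrA_core ((PySem.Str.replace (PySem.Str.replace regon "-" "") " " "").toList)

-- ===== PORT B =====
-- _check(ds, ws, acc): one recursive pass; acc is kept reduced mod 11; when ws is
-- exhausted ds.head is the check digit; a non-digit character rejects immediately
-- '0' <= d <= '9'
def vrB_isdig (c : Char) : Bool := '0' ≤ c && c ≤ '9'

def vrB_check : List Char → List Int → Int → Bool
  | [], _, _ => false
  | d :: ds, ws, acc =>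
    if vrB_isdig d then
      let v : Int := (d.toNat : Int) - 48
      match ws with
      | [] => acc == v
      | w :: ws' => vrB_check ds ws' (PySem.Int.mod (acc + v * w) 11)
    else false

def vrB_core (cs : List Char) : Bool :=
  if cs.length == 9 then vrB_check cs [8, 9, 2, 3, 4, 5, 6, 7] 0
  else if cs.length == 14 then vrB_check cs [2, 4, 8, 5, 0, 9, 7, 3, 6, 1, 2, 4, 8] 0
  else false

def validate_regon_alt (regon : String) : Bool :=
  vrB_core ((PySem.Str.replace (PySem.Str.replace regon "-" "") " " "").toList)

-- ===== PRECONDITION & SPEC =====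
def Spec_validate_regon (regon : String) (out : Bool) : Prop := out = validate_regon_alt regon
instance (regon : String) (out : Bool) : Decidable (Spec_validate_regon regon out) := by unfold Spec_validate_regon; infer_instance

-- ===== CLAIM (what is proved, stated in full; the proofs are below) =====
def Claim_equal_validate_regon : Prop := ∀ (regon : String), Dom_validate_regon regon → Spec_validate_regon regon (validate_regon regon)

-- ===== LEMMAS AND PROOFS =====

-- int(d) for one printable-ASCII character: the digit's value, ValueError otherwise
lemma ofChars_single (c : Char) (hd : pvDomChar c = true) :
    PySem.Int.ofChars? [c] = if vrB_isdig c then some ((c.toNat : Int) - 48) else none := by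
  have hb : 9 ≤ c.toNat ∧ c.toNat ≤ 126 := by
    simp [pvDomChar] at hd; omega
  have hc : c = Char.ofNat c.toNat := (Char.ofNat_toNat c).symm
  rw [hc]
  obtain ⟨h1, h2⟩ := hb
  set n := c.toNat with hn
  clear_value n
  interval_cases n <;> decide

lemma replace_go_subset (old : List Char) (fuel : Nat) : ∀ l acc : List Char, ∀ x : Char,
    x ∈ PySem.Chars.replace.go old [] fuel l acc → x ∈ l ∨ x ∈ acc := by
  induction fuel with
  | zero => intro l acc x h; simp [PySem.Chars.replace.go] at h; tauto
  | succ n ih =>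
    intro l acc x h
    cases l with
    | nil => simp [PySem.Chars.replace.go] at h; tauto
    | cons c t =>
      rw [PySem.Chars.replace.go] at h
      split at h
      · rcases ih _ _ _ h with h' | h'
        · exact Or.inl (List.mem_of_mem_drop h')
        · simp at h'; tauto
      · rcases ih _ _ _ h with h' | h'
        · exact Or.inl (List.mem_cons_of_mem _ h')
        · simp at h'; rcases h' with h' | h'
          · simp [h']
          · tauto

-- deleting replace: every surviving character was in the input
lemma replace_del_subset (s old : List Char) (x : Char) (h : x ∈ PySem.Chars.replace s old []) : x ∈ s := by
  unfold PySem.Chars.replace at h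
  split at h
  · simpa using h
  · rcases replace_go_subset old s.length s [] x h with h' | h'
    · exact h'
    · simp at h'

set_option maxHeartbeats 2000000 in
-- the 9-digit branch, characters made explicit
lemma core_eq9 (c0 c1 c2 c3 c4 c5 c6 c7 c8 : Char)
    (hd : ∀ c ∈ [c0,c1,c2,c3,c4,c5,c6,c7,c8], pvDomChar c = true) :
    vrA_core [c0,c1,c2,c3,c4,c5,c6,c7,c8] = vrB_core [c0,c1,c2,c3,c4,c5,c6,c7,c8] := by
  simp only [vrA_core, vrB_core, vrA_sum, vrA_finish]
  have d0 : pvDomChar c0 = true := hd _ (by simp)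
  have d1 : pvDomChar c1 = true := hd _ (by simp)
  have d2 : pvDomChar c2 = true := hd _ (by simp)
  have d3 : pvDomChar c3 = true := hd _ (by simp)
  have d4 : pvDomChar c4 = true := hd _ (by simp)
  have d5 : pvDomChar c5 = true := hd _ (by simp)
  have d6 : pvDomChar c6 = true := hd _ (by simp)
  have d7 : pvDomChar c7 = true := hd _ (by simp)
  have d8 : pvDomChar c8 = true := hd _ (by simp)
  simp [PySem.List.pyRange, PySem.List.pyGet?, PySem.List.pyIdx?, vrB_check,
    List.range_succ, ofChars_single _ d0, ofChars_single _ d1, ofChars_single _ d2,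
    ofChars_single _ d3, ofChars_single _ d4, ofChars_single _ d5, ofChars_single _ d6,
    ofChars_single _ d7]
  cases h0 : vrB_isdig c0 <;> simp_all [vrB_check]
  cases h1 : vrB_isdig c1 <;> simp_all [vrB_check]
  cases h2 : vrB_isdig c2 <;> simp_all [vrB_check]
  cases h3 : vrB_isdig c3 <;> simp_all [vrB_check]
  cases h4 : vrB_isdig c4 <;> simp_all [vrB_check]
  cases h5 : vrB_isdig c5 <;> simp_all [vrB_check]
  cases h6 : vrB_isdig c6 <;> simp_all [vrB_check]
  cases h7 : vrB_isdig c7 <;> simp_all [vrB_check]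
  cases h8 : vrB_isdig c8 <;> simp_all [vrB_check, ofChars_single _ d8, Int.emod_add_emod]

set_option maxHeartbeats 4000000 in
-- the 14-digit branch, characters made explicit
lemma core_eq14 (c0 c1 c2 c3 c4 c5 c6 c7 c8 c9 c10 c11 c12 c13 : Char)
    (hd : ∀ c ∈ [c0,c1,c2,c3,c4,c5,c6,c7,c8,c9,c10,c11,c12,c13], pvDomChar c = true) :
    vrA_core [c0,c1,c2,c3,c4,c5,c6,c7,c8,c9,c10,c11,c12,c13] =
      vrB_core [c0,c1,c2,c3,c4,c5,c6,c7,c8,c9,c10,c11,c12,c13] := by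
  simp only [vrA_core, vrB_core, vrA_sum, vrA_finish]
  have d0 : pvDomChar c0 = true := hd _ (by simp)
  have d1 : pvDomChar c1 = true := hd _ (by simp)
  have d2 : pvDomChar c2 = true := hd _ (by simp)
  have d3 : pvDomChar c3 = true := hd _ (by simp)
  have d4 : pvDomChar c4 = true := hd _ (by simp)
  have d5 : pvDomChar c5 = true := hd _ (by simp)
  have d6 : pvDomChar c6 = true := hd _ (by simp)
  have d7 : pvDomChar c7 = true := hd _ (by simp)
  have d8 : pvDomChar c8 = true := hd _ (by simp)
  have d9 : pvDomChar c9 = true := hd _ (by simp)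
  have d10 : pvDomChar c10 = true := hd _ (by simp)
  have d11 : pvDomChar c11 = true := hd _ (by simp)
  have d12 : pvDomChar c12 = true := hd _ (by simp)
  have d13 : pvDomChar c13 = true := hd _ (by simp)
  simp [PySem.List.pyRange, PySem.List.pyGet?, PySem.List.pyIdx?, vrB_check,
    List.range_succ, ofChars_single _ d0, ofChars_single _ d1, ofChars_single _ d2,
    ofChars_single _ d3, ofChars_single _ d4, ofChars_single _ d5, ofChars_single _ d6,
    ofChars_single _ d7, ofChars_single _ d8, ofChars_single _ d9, ofChars_single _ d10,
    ofChars_single _ d11, ofChars_single _ d12]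
  cases h0 : vrB_isdig c0 <;> simp_all [vrB_check]
  cases h1 : vrB_isdig c1 <;> simp_all [vrB_check]
  cases h2 : vrB_isdig c2 <;> simp_all [vrB_check]
  cases h3 : vrB_isdig c3 <;> simp_all [vrB_check]
  cases h4 : vrB_isdig c4 <;> simp_all [vrB_check]
  cases h5 : vrB_isdig c5 <;> simp_all [vrB_check]
  cases h6 : vrB_isdig c6 <;> simp_all [vrB_check]
  cases h7 : vrB_isdig c7 <;> simp_all [vrB_check]
  cases h8 : vrB_isdig c8 <;> simp_all [vrB_check]
  cases h9 : vrB_isdig c9 <;> simp_all [vrB_check]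
  cases h10 : vrB_isdig c10 <;> simp_all [vrB_check]
  cases h11 : vrB_isdig c11 <;> simp_all [vrB_check]
  cases h12 : vrB_isdig c12 <;> simp_all [vrB_check]
  cases h13 : vrB_isdig c13 <;> simp_all [ofChars_single _ d13]

lemma core_eq (cs : List Char) (hd : ∀ c ∈ cs, pvDomChar c = true) : vrA_core cs = vrB_core cs := by
  rcases cs with _ | ⟨c0, _ | ⟨c1, _ | ⟨c2, _ | ⟨c3, _ | ⟨c4, _ | ⟨c5, _ | ⟨c6, _ | ⟨c7, _ | ⟨c8, _ | ⟨c9, _ | ⟨c10, _ | ⟨c11, _ | ⟨c12, _ | ⟨c13, _ | ⟨c14, t⟩⟩⟩⟩⟩⟩⟩⟩⟩⟩⟩⟩⟩⟩⟩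
  · simp [vrA_core, vrB_core]
  · simp [vrA_core, vrB_core]
  · simp [vrA_core, vrB_core]
  · simp [vrA_core, vrB_core]
  · simp [vrA_core, vrB_core]
  · simp [vrA_core, vrB_core]
  · simp [vrA_core, vrB_core]
  · simp [vrA_core, vrB_core]
  · simp [vrA_core, vrB_core]
  · exact core_eq9 _ _ _ _ _ _ _ _ _ hd
  · simp [vrA_core, vrB_core]
  · simp [vrA_core, vrB_core]
  · simp [vrA_core, vrB_core]
  · simp [vrA_core, vrB_core]
  · exact core_eq14 _ _ _ _ _ _ _ _ _ _ _ _ _ _ hd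
  · simp [vrA_core, vrB_core]

-- ===== VERDICT (by name: the statement is the Claim_ definition above) =====
theorem validate_regon_spec : Claim_equal_validate_regon := by
  intro regon hdom
  unfold Spec_validate_regon validate_regon validate_regon_alt
  apply core_eq
  intro c hc
  simp only [PySem.Str.toList_replace] at hc
  have h1 := replace_del_subset _ _ _ (by simpa using hc)
  have h2 := replace_del_subset _ _ _ (by simpa using h1)
  have := hdom
  simp only [Dom_validate_regon, pvDomStr, List.all_eq_true] at this
  exact this c h2
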